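-- pv_equiv track=rewrite | github.com/ytp101/2x2-project | 3x3 Project.py | process_pattern
-- ===== SOURCE A (Python) =====
-- def process_pattern(pattern):
--     results = [0] * 4
--     for value in pattern:
--         results[0] ^= value in (1, 2, 3)
--         results[1] ^= value in (1, 2, 4)
--         results[2] ^= value in (1, 3, 4)
--         results[3] ^= value in (2, 3, 4)
--     return results
-- ===== SOURCE B (Python) =====
-- def process_pattern(pattern):
--     # Count occurrences of each of 1..4 in staged passes, then reduce counts mod 2.
--     c1 = pattern.count(1)
--     c2 = pattern.count(2)
--     c3 = pattern.count(3)
--     c4 = pattern.count(4)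
--     return [(c1 + c2 + c3) % 2, (c1 + c2 + c4) % 2,
--             (c1 + c3 + c4) % 2, (c2 + c3 + c4) % 2]
-- ===== Notes on version B (the rewrite author's own statement) =====
-- stated objective: faster
-- what changed: B replaces A's single pass of four xor-accumulated membership flags by four list.count passes (counts of 1,2,3,4) followed by a closed-form reduction of the counts modulo 2; the counting runs in C instead of per-element Python bytecode.
import Mathlib
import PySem

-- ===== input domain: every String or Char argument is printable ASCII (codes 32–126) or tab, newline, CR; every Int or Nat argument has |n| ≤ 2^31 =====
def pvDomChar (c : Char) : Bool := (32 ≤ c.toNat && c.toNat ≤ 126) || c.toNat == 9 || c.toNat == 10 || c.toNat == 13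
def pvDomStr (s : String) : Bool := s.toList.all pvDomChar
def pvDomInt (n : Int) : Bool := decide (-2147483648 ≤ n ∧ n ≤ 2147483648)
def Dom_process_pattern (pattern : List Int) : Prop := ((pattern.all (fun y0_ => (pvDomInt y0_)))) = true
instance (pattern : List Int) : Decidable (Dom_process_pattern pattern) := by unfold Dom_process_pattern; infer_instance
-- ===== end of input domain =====

-- B counts the occurrences of 1..4 in four staged passes and reduces the counts mod 2 (alternative algorithm, same asymptotic cost).
-- ===== PORT A =====
def process_pattern (pattern : List Int) : List Int :=
  let r := pattern.foldl (fun (r : Int × Int × Int × Int) value =>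
    (PySem.Int.bxor r.1 (if value = 1 ∨ value = 2 ∨ value = 3 then 1 else 0),
     PySem.Int.bxor r.2.1 (if value = 1 ∨ value = 2 ∨ value = 4 then 1 else 0),
     PySem.Int.bxor r.2.2.1 (if value = 1 ∨ value = 3 ∨ value = 4 then 1 else 0),
     PySem.Int.bxor r.2.2.2 (if value = 2 ∨ value = 3 ∨ value = 4 then 1 else 0))) (0, 0, 0, 0)
  [r.1, r.2.1, r.2.2.1, r.2.2.2]

-- ===== PORT B =====
def process_pattern_alt (pattern : List Int) : List Int :=
  let c1 : Int := (PySem.List.count pattern 1 : Nat)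
  let c2 : Int := (PySem.List.count pattern 2 : Nat)
  let c3 : Int := (PySem.List.count pattern 3 : Nat)
  let c4 : Int := (PySem.List.count pattern 4 : Nat)
  [PySem.Int.mod (c1 + c2 + c3) 2, PySem.Int.mod (c1 + c2 + c4) 2,
   PySem.Int.mod (c1 + c3 + c4) 2, PySem.Int.mod (c2 + c3 + c4) 2]

-- ===== PRECONDITION & SPEC =====
def Spec_process_pattern (pattern : List Int) (out : List Int) : Prop := out = process_pattern_alt pattern
instance (pattern : List Int) (out : List Int) : Decidable (Spec_process_pattern pattern out) := by unfold Spec_process_pattern; infer_instance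

-- ===== CLAIM (what is proved, stated in full; the proofs are below) =====
def Claim_equal_process_pattern : Prop := ∀ (pattern : List Int), Dom_process_pattern pattern → Spec_process_pattern pattern (process_pattern pattern)

-- ===== LEMMAS AND PROOFS =====
def pvIsBit (a : Int) : Prop := a = 0 ∨ a = 1

theorem pvModCast (n : Nat) : PySem.Int.mod (n : Int) 2 = ((n % 2 : Nat) : Int) := by
  rw [PySem.Int.mod_eq_emod_of_pos (by norm_num)]
  exact_mod_cast rfl

-- parity step: xor-ing a bit with an indicator and then with a count's parity
-- equals xor-ing with the parity of the incremented count
theorem pvStep (a : Int) (ha : pvIsBit a) (m n : Nat) (hm : m ≤ 1) :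
    PySem.Int.bxor (PySem.Int.bxor a (m : Int)) (PySem.Int.mod (n : Int) 2)
      = PySem.Int.bxor a (PySem.Int.mod ((n + m : Nat) : Int) 2) := by
  rw [pvModCast, pvModCast]
  interval_cases m
  · rw [Nat.add_zero]
    rcases ha with rfl | rfl <;> norm_num [PySem.Int.bxor_zero]
  · have h2 : (n + 1) % 2 = 1 - n % 2 := by omega
    rcases Nat.mod_two_eq_zero_or_one n with h | h <;>
      rw [h2, h] <;> rcases ha with rfl | rfl <;> decide

-- count-sum abbreviations (Nat)
def pvS1 (l : List Int) : Nat := PySem.List.count l 1 + PySem.List.count l 2 + PySem.List.count l 3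
def pvS2 (l : List Int) : Nat := PySem.List.count l 1 + PySem.List.count l 2 + PySem.List.count l 4
def pvS3 (l : List Int) : Nat := PySem.List.count l 1 + PySem.List.count l 3 + PySem.List.count l 4
def pvS4 (l : List Int) : Nat := PySem.List.count l 2 + PySem.List.count l 3 + PySem.List.count l 4

theorem pvCount_cons (x v : Int) (t : List Int) :
    PySem.List.count (x :: t) v = PySem.List.count t v + (if x = v then 1 else 0) := by
  rw [PySem.List.count_eq, PySem.List.count_eq, List.count_cons]
  by_cases h : x = v
  · subst h; simp
  · simp [beq_iff_eq, h]

-- A's fold from a bit state equals that state xor-ed with the count parities of the list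
theorem pv_foldA (l : List Int) (a b c d : Int)
    (ha : pvIsBit a) (hb : pvIsBit b) (hc : pvIsBit c) (hd : pvIsBit d) :
    l.foldl (fun (r : Int × Int × Int × Int) value =>
      (PySem.Int.bxor r.1 (if value = 1 ∨ value = 2 ∨ value = 3 then 1 else 0),
       PySem.Int.bxor r.2.1 (if value = 1 ∨ value = 2 ∨ value = 4 then 1 else 0),
       PySem.Int.bxor r.2.2.1 (if value = 1 ∨ value = 3 ∨ value = 4 then 1 else 0),
       PySem.Int.bxor r.2.2.2 (if value = 2 ∨ value = 3 ∨ value = 4 then 1 else 0))) (a, b, c, d)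
    = (PySem.Int.bxor a (PySem.Int.mod (pvS1 l : Nat) 2),
       PySem.Int.bxor b (PySem.Int.mod (pvS2 l : Nat) 2),
       PySem.Int.bxor c (PySem.Int.mod (pvS3 l : Nat) 2),
       PySem.Int.bxor d (PySem.Int.mod (pvS4 l : Nat) 2)) := by
  induction l generalizing a b c d with
  | nil =>
    simp only [List.foldl_nil, pvS1, pvS2, pvS3, pvS4, PySem.List.count_eq, List.count_nil]
    rcases ha with rfl | rfl <;> rcases hb with rfl | rfl <;> rcases hc with rfl | rfl <;>
      rcases hd with rfl | rfl <;> decide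
  | cons x t ih =>
    simp only [List.foldl_cons]
    have m1 : pvIsBit (PySem.Int.bxor a (if x = 1 ∨ x = 2 ∨ x = 3 then 1 else 0)) := by
      split <;> rcases ha with rfl | rfl <;> first | exact Or.inl (by decide) | exact Or.inr (by decide)
    have m2 : pvIsBit (PySem.Int.bxor b (if x = 1 ∨ x = 2 ∨ x = 4 then 1 else 0)) := by
      split <;> rcases hb with rfl | rfl <;> first | exact Or.inl (by decide) | exact Or.inr (by decide)
    have m3 : pvIsBit (PySem.Int.bxor c (if x = 1 ∨ x = 3 ∨ x = 4 then 1 else 0)) := by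
      split <;> rcases hc with rfl | rfl <;> first | exact Or.inl (by decide) | exact Or.inr (by decide)
    have m4 : pvIsBit (PySem.Int.bxor d (if x = 2 ∨ x = 3 ∨ x = 4 then 1 else 0)) := by
      split <;> rcases hd with rfl | rfl <;> first | exact Or.inl (by decide) | exact Or.inr (by decide)
    rw [ih _ _ _ _ m1 m2 m3 m4]
    have e1 : pvS1 (x :: t) = pvS1 t + (if x = 1 ∨ x = 2 ∨ x = 3 then 1 else 0) := by
      simp only [pvS1]
      rw [pvCount_cons, pvCount_cons, pvCount_cons]
      by_cases h1 : x = 1 <;> by_cases h2 : x = 2 <;> by_cases h3 : x = 3 <;>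
        simp [h1, h2, h3] <;> omega
    have e2 : pvS2 (x :: t) = pvS2 t + (if x = 1 ∨ x = 2 ∨ x = 4 then 1 else 0) := by
      simp only [pvS2]
      rw [pvCount_cons, pvCount_cons, pvCount_cons]
      by_cases h1 : x = 1 <;> by_cases h2 : x = 2 <;> by_cases h3 : x = 4 <;>
        simp [h1, h2, h3] <;> omega
    have e3 : pvS3 (x :: t) = pvS3 t + (if x = 1 ∨ x = 3 ∨ x = 4 then 1 else 0) := by
      simp only [pvS3]
      rw [pvCount_cons, pvCount_cons, pvCount_cons]
      by_cases h1 : x = 1 <;> by_cases h2 : x = 3 <;> by_cases h3 : x = 4 <;>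
        simp [h1, h2, h3] <;> omega
    have e4 : pvS4 (x :: t) = pvS4 t + (if x = 2 ∨ x = 3 ∨ x = 4 then 1 else 0) := by
      simp only [pvS4]
      rw [pvCount_cons, pvCount_cons, pvCount_cons]
      by_cases h1 : x = 2 <;> by_cases h2 : x = 3 <;> by_cases h3 : x = 4 <;>
        simp [h1, h2, h3] <;> omega
    rw [e1, e2, e3, e4]
    congr 1
    · split <;> [exact pvStep a ha 1 (pvS1 t) (by omega); exact pvStep a ha 0 (pvS1 t) (by omega)]
    congr 1
    · split <;> [exact pvStep b hb 1 (pvS2 t) (by omega); exact pvStep b hb 0 (pvS2 t) (by omega)]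
    congr 1
    · split <;> [exact pvStep c hc 1 (pvS3 t) (by omega); exact pvStep c hc 0 (pvS3 t) (by omega)]
    · split <;> [exact pvStep d hd 1 (pvS4 t) (by omega); exact pvStep d hd 0 (pvS4 t) (by omega)]

-- ===== VERDICT =====
theorem process_pattern_spec : Claim_equal_process_pattern := by
  intro pattern _
  unfold Spec_process_pattern process_pattern process_pattern_alt
  rw [pv_foldA pattern 0 0 0 0 (Or.inl rfl) (Or.inl rfl) (Or.inl rfl) (Or.inl rfl)]
  simp only [pvS1, pvS2, pvS3, pvS4,
    show ∀ y : Int, PySem.Int.bxor 0 y = y from fun y => by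
      rw [PySem.Int.bxor_comm, PySem.Int.bxor_zero]]
  push_cast
  ring_nf
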